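-- pv_equiv track=rewrite | github.com/camelia409/project | algorithms/zone_planner.py | _initial_assignment
-- ===== SOURCE A (Python) =====
-- from typing import List, Dict, Tuple, Optional
--
-- ZONE_3: Dict[str, str] = {
--     # Public — directly accessible from entry
--     "verandah":  "public",
--     "living":    "public",
--     "entrance":  "public",
--     "courtyard": "public",
--     # Semi-private — functional support, not guest-sleeping
--     "dining":    "semi",
--     "kitchen":   "semi",
--     "corridor":  "semi",
--     "utility":   "semi",
--     "store":     "semi",
--     "office":    "semi",
--     # Private — sleeping, devotion, hygiene
--     "bedroom":   "private",
--     "bathroom":  "private",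
--     "toilet":    "private",
--     "pooja":     "private",
--     "study":     "private",
--     "lightwell": "private",
-- }
--
-- def _initial_assignment(
--     room_types: List[str]
-- ) -> Tuple[List[str], List[str], List[str]]:
--     pub:  List[str] = []
--     semi: List[str] = []
--     priv: List[str] = []
--     for rt in room_types:
--         zone = ZONE_3.get(rt, "semi")
--         if zone == "public":
--             pub.append(rt)
--         elif zone == "semi":
--             semi.append(rt)
--         else:
--             priv.append(rt)
--     return pub, semi, priv
-- ===== SOURCE B (Python) =====
-- from typing import List, Dict, Tuple
--
-- ZONE_3: Dict[str, str] = {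
--     "verandah":  "public",
--     "living":    "public",
--     "entrance":  "public",
--     "courtyard": "public",
--     "dining":    "semi",
--     "kitchen":   "semi",
--     "corridor":  "semi",
--     "utility":   "semi",
--     "store":     "semi",
--     "office":    "semi",
--     "bedroom":   "private",
--     "bathroom":  "private",
--     "toilet":    "private",
--     "pooja":     "private",
--     "study":     "private",
--     "lightwell": "private",
-- }
--
-- def _zone(rt: str) -> str:
--     return ZONE_3.get(rt, "semi")
--
-- def _initial_assignment(room_types):
--     # Three staged filter passes, one per zone; each preserves input order,
--     # and every room falls in exactly one zone, so this equals A's partition.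
--     pub  = [rt for rt in room_types if _zone(rt) == "public"]
--     semi = [rt for rt in room_types if _zone(rt) == "semi"]
--     priv = [rt for rt in room_types if _zone(rt) == "private"]
--     return pub, semi, priv
-- ===== Notes on version B (the rewrite author's own statement) =====
-- stated objective: simpler
-- what changed: Replaces the single mutating pass with three named accumulators and an if/elif/else chain by three independent filter passes, one per zone label; correct because each element's zone is exactly one of the three labels and filtering preserves order.
import Mathlib
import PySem

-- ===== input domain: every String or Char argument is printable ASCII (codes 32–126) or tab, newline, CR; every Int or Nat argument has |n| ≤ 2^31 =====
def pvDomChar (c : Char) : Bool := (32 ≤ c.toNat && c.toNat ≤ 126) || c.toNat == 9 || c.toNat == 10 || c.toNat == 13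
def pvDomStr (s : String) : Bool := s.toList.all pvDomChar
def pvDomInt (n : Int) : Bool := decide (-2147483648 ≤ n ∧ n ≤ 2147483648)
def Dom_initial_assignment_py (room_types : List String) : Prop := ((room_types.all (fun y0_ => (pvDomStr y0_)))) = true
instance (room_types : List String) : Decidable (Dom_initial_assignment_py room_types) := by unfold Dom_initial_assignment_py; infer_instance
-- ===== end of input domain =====

-- B replaces A's single accumulating pass and if/elif chain by three independent filter passes, one per zone ('simpler'); same O(n).

-- ===== PORT A =====
-- the module constant ZONE_3 (insertion order as in the Python source)
def ZONE3 : PySem.Dict String String := PySem.Dict.mk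
  [("verandah", "public"), ("living", "public"), ("entrance", "public"), ("courtyard", "public"),
   ("dining", "semi"), ("kitchen", "semi"), ("corridor", "semi"), ("utility", "semi"),
   ("store", "semi"), ("office", "semi"),
   ("bedroom", "private"), ("bathroom", "private"), ("toilet", "private"), ("pooja", "private"),
   ("study", "private"), ("lightwell", "private")]

-- the loop body of A (one iteration: dispatch rt into the matching accumulator)
def stepA (acc : List String × List String × List String) (rt : String) :
    List String × List String × List String :=
  let zone := ZONE3.getD rt "semi"
  if zone == "public" then (acc.1 ++ [rt], acc.2.1, acc.2.2)
  else if zone == "semi" then (acc.1, acc.2.1 ++ [rt], acc.2.2)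
  else (acc.1, acc.2.1, acc.2.2 ++ [rt])

def initial_assignment_py (room_types : List String) : List String × List String × List String :=
  room_types.foldl stepA ([], [], [])

-- ===== PORT B =====
-- helper _zone from Source B
def zoneOf (rt : String) : String := ZONE3.getD rt "semi"

def initial_assignment_py_alt (room_types : List String) : List String × List String × List String :=
  (room_types.filter (fun rt => zoneOf rt == "public"),
   room_types.filter (fun rt => zoneOf rt == "semi"),
   room_types.filter (fun rt => zoneOf rt == "private"))

-- ===== PRECONDITION & SPEC =====
def Spec_initial_assignment_py (room_types : List String) (out : List String × List String × List String) : Prop := out = initial_assignment_py_alt room_types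
instance (room_types : List String) (out : List String × List String × List String) : Decidable (Spec_initial_assignment_py room_types out) := by unfold Spec_initial_assignment_py; infer_instance

-- ===== CLAIM (what is proved, stated in full; the proofs are below) =====
def Claim_equal_initial_assignment_py : Prop := ∀ (room_types : List String), Dom_initial_assignment_py room_types → Spec_initial_assignment_py room_types (initial_assignment_py room_types)

-- ===== LEMMAS AND PROOFS =====

-- the zone label is always one of the three group keys
theorem zone_trichotomy (rt : String) :
    zoneOf rt = "public" ∨ zoneOf rt = "semi" ∨ zoneOf rt = "private" := by
  unfold zoneOf
  rcases h : ZONE3.get? rt with _ | v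
  · rw [PySem.Dict.getD_of_get?_eq_none _ _ h]; tauto
  · rw [PySem.Dict.getD_of_get?_eq_some _ _ h]
    have hm := PySem.Dict.mem_items_of_get?_eq_some _ h
    simp only [ZONE3, List.mem_cons, List.not_mem_nil, or_false, Prod.mk.injEq] at hm
    rcases hm with hm|hm|hm|hm|hm|hm|hm|hm|hm|hm|hm|hm|hm|hm|hm|hm <;> rw [hm.2] <;> tauto

-- loop invariant: A's fold from any accumulators appends exactly B's three filters
theorem fold_eq_filters (l : List String) (p s v : List String) :
    l.foldl stepA (p, s, v)
    = (p ++ l.filter (fun rt => zoneOf rt == "public"),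
       s ++ l.filter (fun rt => zoneOf rt == "semi"),
       v ++ l.filter (fun rt => zoneOf rt == "private")) := by
  induction l generalizing p s v with
  | nil => simp
  | cons rt tl ih =>
    simp only [List.foldl_cons]
    rcases zone_trichotomy rt with h | h | h <;>
      · simp only [zoneOf] at h
        simp only [stepA, h]
        rw [ih]
        simp [List.filter_cons, zoneOf, h]

-- ===== VERDICT (by name: the statement is the Claim_ definition above) =====
theorem initial_assignment_py_spec : Claim_equal_initial_assignment_py := by
  intro room_types _
  unfold Spec_initial_assignment_py initial_assignment_py initial_assignment_py_alt
  rw [fold_eq_filters]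
  simp
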